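-- pv_equiv track=rewrite | github.com/lallmon/lucent-designer | src/lucent/selection_state.py | toggle_selection
-- ===== SOURCE A (Python) =====
-- from typing import Iterable, List, Sequence, Tuple
--
-- def toggle_selection(
--     selected_indices: Sequence[int], hit_index: int, multi: bool
-- ) -> List[int]:
--     """
--     Update selection set given a hit index and multi-select flag.
--
--     Args:
--         selected_indices: current selection indices
--         hit_index: index that was clicked/hit
--         multi: whether multi-select (toggle) behavior is requested
--     """
--     current = list(selected_indices)
--     if hit_index < 0:
--         return [] if not multi else current
--     if not multi:
--         return [hit_index]
--     if hit_index in current: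
--         current = [i for i in current if i != hit_index]
--     else:
--         current.append(hit_index)
--     return current
-- ===== SOURCE B (Python) =====
-- def toggle_selection(selected_indices, hit_index, multi):
--     result = list(selected_indices)
--     if hit_index < 0:
--         return result if multi else []
--     if not multi:
--         return [hit_index]
--     removed = False
--     while True:
--         try:
--             result.remove(hit_index)
--             removed = True
--         except ValueError:
--             break
--     if not removed:
--         result.append(hit_index)
--     return result
-- ===== Notes on version B (the rewrite author's own statement) =====
-- stated objective: alternative
-- what changed: The multi-select toggle is done by repeatedly calling list.remove(hit_index) in place until it raises ValueError (deleting occurrences one at a time), appending hit_index only if no removal happened, instead of A's membership test followed by a list-comprehension rebuild.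
import Mathlib
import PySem

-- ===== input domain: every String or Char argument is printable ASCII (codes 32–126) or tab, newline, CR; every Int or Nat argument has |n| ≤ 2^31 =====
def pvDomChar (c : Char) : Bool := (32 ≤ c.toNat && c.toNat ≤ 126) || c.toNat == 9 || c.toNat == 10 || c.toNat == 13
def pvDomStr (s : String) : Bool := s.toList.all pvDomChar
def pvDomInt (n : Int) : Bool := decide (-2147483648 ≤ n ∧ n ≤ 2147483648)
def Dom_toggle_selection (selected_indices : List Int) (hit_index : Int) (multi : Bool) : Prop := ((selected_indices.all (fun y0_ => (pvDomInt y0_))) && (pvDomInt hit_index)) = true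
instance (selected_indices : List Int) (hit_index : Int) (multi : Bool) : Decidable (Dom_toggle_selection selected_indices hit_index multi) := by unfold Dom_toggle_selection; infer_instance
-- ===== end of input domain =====

-- B replaces A's membership-test + comprehension rebuild with a repeated remove-first-occurrence loop (try/except ValueError) plus an append when nothing was removed (alternative mechanism, same result).


-- ===== PORT A =====
def toggle_selection (selected_indices : List Int) (hit_index : Int) (multi : Bool) : List Int :=
  let current := selected_indices
  if hit_index < 0 then (if !multi then [] else current)
  else if !multi then [hit_index]
  else if current.contains hit_index then current.filter (fun i => i != hit_index)
  else current ++ [hit_index]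

-- ===== PORT B =====
-- the `while True: try result.remove(h) except ValueError: break` loop of Source B;
-- list.remove = PySem.List.remove? (none = ValueError); terminates because remove shortens the list
def tsRemoveLoop (result : List Int) (h : Int) (removed : Bool) : List Int × Bool :=
  match hr : PySem.List.remove? result h with
  | some r => tsRemoveLoop r h true
  | none => (result, removed)
termination_by result.length
decreasing_by
  have hm : h ∈ result := by
    by_contra hn
    rw [(PySem.List.remove?_eq_none_iff result h).mpr hn] at hr
    simp at hr
  rw [PySem.List.remove?_eq_some_erase result h hm] at hr
  cases hr
  have h1 := List.length_erase_of_mem hm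
  have h2 := List.length_pos_of_mem hm
  omega

def toggle_selection_alt (selected_indices : List Int) (hit_index : Int) (multi : Bool) : List Int :=
  let result := selected_indices
  if hit_index < 0 then (if multi then result else [])
  else if !multi then [hit_index]
  else
    let p := tsRemoveLoop result hit_index false
    if !p.2 then p.1 ++ [hit_index] else p.1

-- ===== PRECONDITION & SPEC =====
def Spec_toggle_selection (selected_indices : List Int) (hit_index : Int) (multi : Bool) (out : List Int) : Prop := out = toggle_selection_alt selected_indices hit_index multi
instance (selected_indices : List Int) (hit_index : Int) (multi : Bool) (out : List Int) : Decidable (Spec_toggle_selection selected_indices hit_index multi out) := by unfold Spec_toggle_selection; infer_instance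

-- ===== CLAIM (what is proved, stated in full; the proofs are below) =====
def Claim_equal_toggle_selection : Prop := ∀ (selected_indices : List Int) (hit_index : Int) (multi : Bool), Dom_toggle_selection selected_indices hit_index multi → Spec_toggle_selection selected_indices hit_index multi (toggle_selection selected_indices hit_index multi)

-- ===== LEMMAS AND PROOFS =====

-- erasing one occurrence does not change the h-free filtrate
theorem filter_erase_eq (h : Int) : ∀ xs : List Int,
    (xs.erase h).filter (fun i => i != h) = xs.filter (fun i => i != h) := by
  intro xs
  induction xs with
  | nil => simp
  | cons x xs ih =>
    by_cases hx : x = h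
    · subst hx; simp [List.erase_cons_head]
    · rw [List.erase_cons_tail (by simp [hx])]
      simp [hx, ih]

-- xs with no h is its own h-free filtrate
theorem filter_ne_of_not_mem (h : Int) (xs : List Int) (hn : h ∉ xs) :
    xs.filter (fun i => i != h) = xs := by
  apply List.filter_eq_self.mpr
  intro a ha
  simp only [bne_iff_ne, ne_eq]
  intro he; exact hn (he ▸ ha)

-- the remove loop computes the h-free filtrate and whether h occurred
theorem tsRemoveLoop_eq_aux (h : Int) : ∀ (n : Nat) (xs : List Int), xs.length ≤ n → ∀ b,
    tsRemoveLoop xs h b = (xs.filter (fun i => i != h), b || xs.contains h) := by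
  intro n
  induction n with
  | zero =>
    intro xs hx b
    have hxe : xs = [] := List.eq_nil_of_length_eq_zero (Nat.le_zero.mp hx)
    subst hxe
    rw [tsRemoveLoop]
    split
    · next r hr =>
        rw [(PySem.List.remove?_eq_none_iff [] h).mpr (by simp)] at hr
        simp at hr
    · simp
  | succ n ih =>
    intro xs hx b
    rw [tsRemoveLoop]
    split
    · next r hr =>
        have hm : h ∈ xs := by
          by_contra hn
          rw [(PySem.List.remove?_eq_none_iff xs h).mpr hn] at hr
          simp at hr
        have herase : r = xs.erase h := by
          have := PySem.List.remove?_eq_some_erase xs h hm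
          rw [this] at hr; exact (Option.some.inj hr).symm
        subst herase
        have hlen : (xs.erase h).length ≤ n := by
          have := List.length_erase_of_mem hm
          omega
        rw [ih (xs.erase h) hlen true, filter_erase_eq]
        simp [hm]
    · next hr =>
        have hn : h ∉ xs := (PySem.List.remove?_eq_none_iff xs h).mp hr
        simp [filter_ne_of_not_mem h xs hn, hn]

theorem tsRemoveLoop_eq (h : Int) (xs : List Int) (b : Bool) :
    tsRemoveLoop xs h b = (xs.filter (fun i => i != h), b || xs.contains h) :=
  tsRemoveLoop_eq_aux h xs.length xs le_rfl b

theorem toggle_selection_spec : Claim_equal_toggle_selection := by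
  intro s h m _
  unfold Spec_toggle_selection toggle_selection toggle_selection_alt
  by_cases hneg : h < 0
  · cases m <;> simp [hneg]
  · cases m with
    | false => simp [hneg]
    | true =>
      simp only [hneg, if_false, Bool.not_true, Bool.false_eq_true]
      rw [tsRemoveLoop_eq]
      by_cases hc : h ∈ s
      · have hb : s.contains h = true := by simpa using hc
        simp [hc]
      · have hb : s.contains h = false := by simpa using hc
        simp [hc, filter_ne_of_not_mem h s hc]
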